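-- pv_equiv track=rewrite | github.com/KOGA-ryu/bluebench | backend/derive/cold_start.py | _detect_primary_subsystems
-- ===== SOURCE A (Python) =====
-- PRIORITY_SUBSYSTEMS = ("engine", "core", "profiles", "scripts", "bin", "tests", "app", "src")
--
-- def _detect_primary_subsystems(top_level_dirs: list[str]) -> list[str]:
--     subsystems: list[str] = []
--     for name in PRIORITY_SUBSYSTEMS:
--         if name in top_level_dirs:
--             subsystems.append(name)
--     for name in top_level_dirs:
--         if name not in subsystems:
--             subsystems.append(name)
--     return subsystems[:5]
-- ===== SOURCE B (Python) =====
-- PRIORITY_SUBSYSTEMS = ("engine", "core", "profiles", "scripts", "bin", "tests", "app", "src")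
--
-- def _detect_primary_subsystems(top_level_dirs: list[str]) -> list[str]:
--     rank = {name: i for i, name in enumerate(PRIORITY_SUBSYSTEMS)}
--     deduped = list(dict.fromkeys(top_level_dirs))
--     deduped.sort(key=lambda n: rank.get(n, len(PRIORITY_SUBSYSTEMS)))
--     return deduped[:5]
-- ===== Notes on version B (the rewrite author's own statement) =====
-- stated objective: faster
-- what changed: Replaces A's two append loops with linear membership scans over the input/growing result by a rank dict plus ordered dedup (dict.fromkeys) plus one stable sort keyed by rank (non-priority names get default rank 8), then [:5]; stability keeps non-priority names in first-occurrence order.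
import Mathlib
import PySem

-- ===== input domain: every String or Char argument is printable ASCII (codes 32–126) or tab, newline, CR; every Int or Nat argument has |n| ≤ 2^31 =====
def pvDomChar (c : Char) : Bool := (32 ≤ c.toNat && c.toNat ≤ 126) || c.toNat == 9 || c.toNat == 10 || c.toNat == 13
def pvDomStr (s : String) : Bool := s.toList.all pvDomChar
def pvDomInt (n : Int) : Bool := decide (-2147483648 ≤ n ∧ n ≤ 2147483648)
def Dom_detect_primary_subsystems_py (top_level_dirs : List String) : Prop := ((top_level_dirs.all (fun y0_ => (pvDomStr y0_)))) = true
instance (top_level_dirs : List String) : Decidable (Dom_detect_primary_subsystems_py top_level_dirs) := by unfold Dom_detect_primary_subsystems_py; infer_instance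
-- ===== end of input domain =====

-- B replaces A's two append loops by rank-dict + ordered dedup + one stable sort keyed by rank; the claim is return-value equivalence on all inputs.

def PRIORITY_SUBSYSTEMS : List String := ["engine", "core", "profiles", "scripts", "bin", "tests", "app", "src"]

-- ===== PORT A =====
def detect_primary_subsystems_py (top_level_dirs : List String) : List String :=
  let subsystems1 : List String :=
    PRIORITY_SUBSYSTEMS.foldl (fun acc name =>
      if top_level_dirs.contains name then acc ++ [name] else acc) []
  let subsystems2 : List String :=
    top_level_dirs.foldl (fun acc name =>
      if !(acc.contains name) then acc ++ [name] else acc) subsystems1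
  PySem.List.slice subsystems2 none (some 5)

-- ===== PORT B =====
def detect_primary_subsystems_py_alt (top_level_dirs : List String) : List String :=
  let rank : PySem.Dict String Int :=
    (PySem.List.enumerate PRIORITY_SUBSYSTEMS).foldl
      (fun d p => PySem.Dict.insert d p.2 p.1) PySem.Dict.empty
  let deduped : List String := PySem.List.dedup top_level_dirs
  let sortedDeduped : List String :=
    PySem.List.sorted deduped
      (fun n => PySem.Dict.getD rank n (PRIORITY_SUBSYSTEMS.length : Int)) false
  PySem.List.slice sortedDeduped none (some 5)

-- ===== PRECONDITION & SPEC =====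
def Spec_detect_primary_subsystems_py (top_level_dirs : List String) (out : List String) : Prop := out = detect_primary_subsystems_py_alt top_level_dirs
instance (top_level_dirs : List String) (out : List String) : Decidable (Spec_detect_primary_subsystems_py top_level_dirs out) := by unfold Spec_detect_primary_subsystems_py; infer_instance

-- ===== CLAIM (what is proved, stated in full; the proofs are below) =====
def Claim_equal_detect_primary_subsystems_py : Prop := ∀ (top_level_dirs : List String), Dom_detect_primary_subsystems_py top_level_dirs → Spec_detect_primary_subsystems_py top_level_dirs (detect_primary_subsystems_py top_level_dirs)

-- ===== LEMMAS AND PROOFS =====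

-- B's sort key, with the rank-building fold evaluated to the literal dict
def pvKey (n : String) : Int :=
  PySem.Dict.getD (PySem.Dict.mk [("engine", 0), ("core", 1), ("profiles", 2), ("scripts", 3),
    ("bin", 4), ("tests", 5), ("app", 6), ("src", 7)]) n 8

theorem pvKey_lt_iff (n : String) : pvKey n < 8 ↔ n ∈ PRIORITY_SUBSYSTEMS := by
  simp only [pvKey, PySem.Dict.getD, PySem.Dict.get?_mk_cons, PRIORITY_SUBSYSTEMS]
  split_ifs <;> first
  | (simp_all [PySem.Dict.get?]; tauto)
  | simp_all [PySem.Dict.get?]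

theorem pvKey_le (n : String) : pvKey n ≤ 8 := by
  simp only [pvKey, PySem.Dict.getD, PySem.Dict.get?_mk_cons]
  split_ifs <;> simp [PySem.Dict.get?]

theorem insertBy_append (before : String → String → Bool) (x : String) (P R : List String)
    (hR : ∀ y ∈ R, before x y = true) :
    PySem.List.insertBy before x (P ++ R) = PySem.List.insertBy before x P ++ R := by
  induction P with
  | nil =>
    cases R with
    | nil => rfl
    | cons r rs => simp [PySem.List.insertBy, hR r (by simp)]
  | cons p ps ih =>
    simp only [List.cons_append, PySem.List.insertBy]
    split_ifs <;> simp [ih]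

theorem sorted_append_singleton (xs : List String) (x : String) (key : String → Int) :
    PySem.List.sorted (xs ++ [x]) key
      = PySem.List.insertBy (fun a b => decide (key a < key b)) x (PySem.List.sorted xs key) := by
  rw [PySem.List.sorted_eq_foldl_insertBy, PySem.List.sorted_eq_foldl_insertBy, List.foldl_append]
  rfl

-- stability: the rank-8 (non-priority) names stay behind the priority block, in input order
theorem sorted_split (xs : List String) :
    PySem.List.sorted xs pvKey
      = PySem.List.sorted (xs.filter (fun n => decide (pvKey n < 8))) pvKey
        ++ xs.filter (fun n => decide (pvKey n = 8)) := by
  induction xs using List.reverseRecOn with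
  | nil => rfl
  | append_singleton ys x ih =>
    rw [sorted_append_singleton, ih, List.filter_append, List.filter_append]
    by_cases hx : pvKey x < 8
    · rw [insertBy_append]
      · have h1 : List.filter (fun n => decide (pvKey n < 8)) [x] = [x] := by simp [hx]
        have h2 : List.filter (fun n => decide (pvKey n = 8)) [x] = [] := by simp; omega
        rw [h1, h2, List.append_nil, sorted_append_singleton]
      · intro y hy
        simp only [List.mem_filter, decide_eq_true_eq] at hy
        simp [hx, hy.2]
    · have hx8 : pvKey x = 8 := le_antisymm (pvKey_le x) (by omega)
      rw [PySem.List.insertBy_of_forall_not_before]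
      · simp [hx8, List.append_assoc]
      · intro y hy
        have : pvKey y ≤ 8 := pvKey_le y
        simp only [List.mem_append] at hy
        rcases hy with hy | hy
        · have := ((PySem.List.mem_sorted _ _ _ _).mp hy)
          simp only [List.mem_filter, decide_eq_true_eq] at this
          simp; omega
        · simp only [List.mem_filter, decide_eq_true_eq] at hy
          simp; omega

-- the priority block: present priority names, sorted into priority order
theorem sorted_prio (d : List String) :
    PySem.List.sorted ((PySem.List.dedup d).filter (fun n => decide (pvKey n < 8))) pvKey
      = PRIORITY_SUBSYSTEMS.filter (fun n => (PySem.List.dedup d).contains n) := by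
  apply PySem.List.sorted_eq_of_perm_of_pairwise_lt
  · rw [List.perm_ext_iff_of_nodup]
    · intro a
      simp only [List.mem_filter, decide_eq_true_eq, List.contains_iff_mem, ← pvKey_lt_iff]
      tauto
    · exact List.Nodup.filter _ (by decide)
    · exact List.Nodup.filter _ (PySem.List.nodup_dedup d)
  · exact List.Pairwise.sublist (List.filter_sublist) (by decide)

theorem key_lemma (d : List String) :
    detect_primary_subsystems_py d = detect_primary_subsystems_py_alt d := by
  unfold detect_primary_subsystems_py detect_primary_subsystems_py_alt
  simp only []
  congr 1
  -- B's fold-built rank dict and key are the literal pvKey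
  have hkey : (fun n => PySem.Dict.getD
      ((PySem.List.enumerate PRIORITY_SUBSYSTEMS).foldl
        (fun d p => PySem.Dict.insert d p.2 p.1) PySem.Dict.empty) n
      (PRIORITY_SUBSYSTEMS.length : Int)) = pvKey := by
    funext n; rfl
  rw [hkey, sorted_split, sorted_prio]
  -- A's two loops
  rw [PySem.List.foldl_append_if_eq_filter]
  have hstep : (fun (acc : List String) name =>
      if !(acc.contains name) then acc ++ [name] else acc) = PySem.Set.add := by
    funext acc name
    by_cases h : name ∈ acc <;> simp [h]
  rw [hstep, ← PySem.Set.update_eq_foldl, PySem.Set.update_eq_append_filter]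
  simp only [List.nil_append, PySem.List.dedup_eq_ofList]
  congr 1
  · apply List.filter_congr
    intro x _
    simp [PySem.Set.mem_ofList]
  · apply List.filter_congr
    intro x hx
    have hxk : pvKey x ≤ 8 := pvKey_le x
    have : (pvKey x = 8) ↔ x ∉ PRIORITY_SUBSYSTEMS := by
      rw [← pvKey_lt_iff]; omega
    simp only [PySem.Set.mem_ofList] at *
    by_cases hp : x ∈ PRIORITY_SUBSYSTEMS <;> simp_all

-- ===== VERDICT (by name: the statement is the Claim_ definition above) =====
theorem detect_primary_subsystems_py_spec : Claim_equal_detect_primary_subsystems_py := by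
  intro d _
  exact key_lemma d
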